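-- pv_equiv track=rewrite | github.com/dgreenslade/advent-of-code-2022 | d03.py | common_element_priorities
-- ===== SOURCE A (Python) =====
-- import string
--
-- def common_element_priorities(string_list:list)->list:
--     """Given a list of strings, find the common characters from all. Return summed priority score"""
--     string_sets = [set(x) for x in string_list]
--     common = string_sets[0].intersection(*string_sets)
--     # List of letters in order of priority
--     alpha = string.ascii_letters[:52]
--     score = 0
--     for x in common:
--         # alphabet priority starts at 1, unlike index, so +1
--         score += alpha.find(x) + 1
--     return score
-- ===== SOURCE B (Python) =====
-- import string
--
--
-- def common_element_priorities(string_list: list) -> list: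
--     """Given a list of strings, find the common characters from all. Return summed priority score"""
--     first = string_list[0]
--     score = 0
--     for i, letter in enumerate(string.ascii_letters[:52]):
--         if letter in first and all(letter in s for s in string_list[1:]):
--             score += i + 1
--     return score
-- ===== Notes on version B (the rewrite author's own statement) =====
-- stated objective: idiomatic
-- what changed: Instead of building per-string sets, intersecting them and looking up each common character's priority with alpha.find, B scans the fixed 52-letter priority alphabet once and adds index+1 whenever the letter occurs in every input string.
import Mathlib
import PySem

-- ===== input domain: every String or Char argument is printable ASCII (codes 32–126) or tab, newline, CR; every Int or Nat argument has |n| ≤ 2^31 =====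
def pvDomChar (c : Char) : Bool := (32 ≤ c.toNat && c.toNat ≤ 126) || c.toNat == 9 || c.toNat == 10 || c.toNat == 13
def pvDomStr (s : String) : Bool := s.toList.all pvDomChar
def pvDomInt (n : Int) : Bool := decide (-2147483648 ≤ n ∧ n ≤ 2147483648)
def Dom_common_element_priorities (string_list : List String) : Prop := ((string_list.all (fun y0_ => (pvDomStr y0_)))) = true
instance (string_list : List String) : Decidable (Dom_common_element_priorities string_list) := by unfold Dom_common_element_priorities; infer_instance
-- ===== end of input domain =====

-- B drops the set intersection: it scans the 52 priority letters once and adds index+1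
-- whenever the letter occurs in every input string (objective: idiomatic).

-- string.ascii_letters[:52] (ascii_letters has exactly 52 characters, so the slice is the whole string)
def pvAlpha : List Char := "abcdefghijklmnopqrstuvwxyzABCDEFGHIJKLMNOPQRSTUVWXYZ".toList

-- ===== PORT A =====
def common_element_priorities (string_list : List String) : Int :=
  let string_sets : List (PySem.Set Char) := string_list.map (fun x => PySem.Set.ofList x.toList)
  match string_sets with
  | [] => 0   -- Python: string_sets[0] raises IndexError; excluded by Pre_
  | s0 :: _ =>
    let common : PySem.Set Char := string_sets.foldl (fun a t => PySem.Set.inter a t) s0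
    -- for x in common: score += alpha.find(x) + 1   (sum is independent of the set's iteration order)
    List.foldl (fun score x => score + (PySem.Chars.find pvAlpha [x] + 1)) 0 common

-- ===== PORT B =====
def common_element_priorities_alt (string_list : List String) : Int :=
  match string_list with
  | [] => 0   -- Python: string_list[0] raises IndexError; excluded by Pre_
  | first :: rest =>
    List.foldl (fun score ic =>
        if PySem.Chars.isIn [ic.2] first.toList
            && rest.all (fun s => PySem.Chars.isIn [ic.2] s.toList)
        then score + (ic.1 + 1) else score)
      0 (PySem.List.enumerate pvAlpha)

-- ===== PRECONDITION & SPEC =====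
-- Pre_ excludes only the empty list, on which both A and B raise IndexError.
def Pre_common_element_priorities (string_list : List String) : Prop := string_list ≠ []
instance (string_list : List String) : Decidable (Pre_common_element_priorities string_list) := by
  unfold Pre_common_element_priorities; infer_instance

def pvWitness_common_element_priorities : List String := (["ab", "b"])

def Spec_common_element_priorities (string_list : List String) (out : Int) : Prop := out = common_element_priorities_alt string_list
instance (string_list : List String) (out : Int) : Decidable (Spec_common_element_priorities string_list out) := by unfold Spec_common_element_priorities; infer_instance

-- ===== CLAIM (what is proved, stated in full; the proofs are below) =====
def Claim_equal_common_element_priorities : Prop := ∀ (string_list : List String), Dom_common_element_priorities string_list → Pre_common_element_priorities string_list → Spec_common_element_priorities string_list (common_element_priorities string_list)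

-- ===== LEMMAS AND PROOFS =====

-- priority weight of one character, as A computes it
def pvW (c : Char) : Int := PySem.Chars.find pvAlpha [c] + 1

lemma singleton_infix_iff_mem (c : Char) (l : List Char) : [c] <:+: l ↔ c ∈ l := by
  constructor
  · intro h; exact h.mem (List.mem_singleton_self c)
  · intro h
    obtain ⟨s, t, rfl⟩ := List.append_of_mem h
    exact ⟨s, t, by simp⟩

lemma isIn_singleton_iff (c : Char) (l : List Char) :
    PySem.Chars.isIn [c] l = true ↔ c ∈ l := by
  rw [PySem.Chars.isIn_iff_infix, singleton_infix_iff_mem]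

lemma pvW_eq_zero_of_not_mem {c : Char} (h : c ∉ pvAlpha) : pvW c = 0 := by
  have : PySem.Chars.find pvAlpha [c] = -1 := by
    rw [PySem.Chars.find_eq_neg_one_iff, singleton_infix_iff_mem]; exact h
  simp [pvW, this]

-- membership in the folded intersection
lemma mem_foldl_inter (l : List (PySem.Set Char)) (acc : PySem.Set Char) (c : Char) :
    c ∈ l.foldl (fun a t => PySem.Set.inter a t) acc ↔ c ∈ acc ∧ ∀ t ∈ l, c ∈ t := by
  induction l generalizing acc with
  | nil => simp
  | cons t l ih =>
    simp only [List.foldl_cons, ih, PySem.Set.mem_inter, List.mem_cons]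
    constructor
    · rintro ⟨⟨h1, h2⟩, h3⟩
      refine ⟨h1, fun u hu => ?_⟩
      rcases hu with rfl | hu
      · exact h2
      · exact h3 u hu
    · rintro ⟨h1, h3⟩
      exact ⟨⟨h1, h3 t (Or.inl rfl)⟩, fun u hu => h3 u (Or.inr hu)⟩

lemma nodup_foldl_inter (l : List (PySem.Set Char)) (acc : PySem.Set Char)
    (h : acc.Nodup) : (l.foldl (fun a t => PySem.Set.inter a t) acc).Nodup := by
  induction l generalizing acc with
  | nil => exact h
  | cons t l ih => exact ih _ (h.filter _)

-- characters common to all strings, as A's folded intersection sees them vs B's test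
lemma mem_common_iff (first : String) (rest : List String) (c : Char) :
    c ∈ ((first :: rest).map (fun x => PySem.Set.ofList x.toList)).foldl
          (fun a t => PySem.Set.inter a t) (PySem.Set.ofList first.toList)
      ↔ (PySem.Chars.isIn [c] first.toList
          && rest.all (fun s => PySem.Chars.isIn [c] s.toList)) = true := by
  rw [mem_foldl_inter]
  simp only [List.map_cons, List.mem_cons, List.mem_map, Bool.and_eq_true, List.all_eq_true,
    isIn_singleton_iff, PySem.Set.mem_ofList]
  constructor
  · rintro ⟨h1, h2⟩
    refine ⟨h1, fun s hs => ?_⟩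
    have := h2 (PySem.Set.ofList s.toList) (Or.inr ⟨s, hs, rfl⟩)
    rwa [PySem.Set.mem_ofList] at this
  · rintro ⟨h1, h2⟩
    refine ⟨h1, fun t ht => ?_⟩
    rcases ht with rfl | ⟨s, hs, rfl⟩
    · rw [PySem.Set.mem_ofList]; exact h1
    · rw [PySem.Set.mem_ofList]; exact h2 s hs

-- dropping the terms outside alpha does not change A's sum
lemma sum_map_pvW_filter (l : List Char) :
    (l.map pvW).sum = ((l.filter (fun c => decide (c ∈ pvAlpha))).map pvW).sum := by
  induction l with
  | nil => rfl
  | cons c l ih =>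
    by_cases h : c ∈ pvAlpha
    · simp [h, ih]
    · simp [h, ih, pvW_eq_zero_of_not_mem h]

lemma nodup_pvAlpha : pvAlpha.Nodup := by decide

-- A's sum over a nodup list of common characters equals the sum over the filtered alphabet
lemma sum_pvW_eq (common : List Char) (cond : Char → Bool)
    (hnodup : common.Nodup) (hmem : ∀ c, c ∈ common ↔ cond c = true) :
    (common.map pvW).sum = ((pvAlpha.filter cond).map pvW).sum := by
  rw [sum_map_pvW_filter]
  refine List.Perm.sum_eq (List.Perm.map pvW ?_)
  rw [List.perm_ext_iff_of_nodup (hnodup.filter _) (nodup_pvAlpha.filter _)]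
  intro c
  simp only [List.mem_filter, decide_eq_true_eq, hmem c]
  tauto

-- B's loop over enumerate, rewritten as a sum of weights over the filtered alphabet
lemma foldl_enumerate_eq (cond : Char → Bool) (L : List Char) (start a : Int)
    (H : ∀ p ∈ PySem.List.enumerate L start, p.1 + 1 = pvW p.2) :
    List.foldl (fun score ic => if cond ic.2 then score + (ic.1 + 1) else score) a
        (PySem.List.enumerate L start)
      = a + ((L.filter cond).map pvW).sum := by
  induction L generalizing start a with
  | nil => simp [PySem.List.enumerate]
  | cons c L ih =>
    have hc : start + 1 = pvW c := H (start, c) (by simp [PySem.List.enumerate])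
    have Ht : ∀ p ∈ PySem.List.enumerate L (start + 1), p.1 + 1 = pvW p.2 := by
      intro p hp; exact H p (by simp [PySem.List.enumerate, hp])
    rw [show PySem.List.enumerate (c :: L) start
          = (start, c) :: PySem.List.enumerate L (start + 1) from rfl,
        List.foldl_cons, ih _ _ Ht]
    by_cases h : cond c = true
    · rw [if_pos h, List.filter_cons_of_pos h, List.map_cons, List.sum_cons, ← hc]
      ring
    · rw [if_neg h, List.filter_cons_of_neg (by simpa using h)]

lemma enumerate_pvAlpha_weights :
    ∀ p ∈ PySem.List.enumerate pvAlpha 0, p.1 + 1 = pvW p.2 := by decide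

-- ===== VERDICT (by name: the statement is the Claim_ definition above) =====
theorem common_element_priorities_spec : Claim_equal_common_element_priorities := by
  intro string_list _ hpre
  unfold Spec_common_element_priorities
  rcases string_list with _ | ⟨first, rest⟩
  · exact absurd rfl hpre
  · calc common_element_priorities (first :: rest)
        = ((((first :: rest).map (fun x => PySem.Set.ofList x.toList)).foldl
              (fun a t => PySem.Set.inter a t) (PySem.Set.ofList first.toList)).map pvW).sum :=
          (PySem.List.foldl_add _ pvW 0).trans (zero_add _)
      _ = ((pvAlpha.filter (fun c => PySem.Chars.isIn [c] first.toList
              && rest.all (fun s => PySem.Chars.isIn [c] s.toList))).map pvW).sum :=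
          sum_pvW_eq _ _ (nodup_foldl_inter _ _ (PySem.Set.nodup_ofList _)) (mem_common_iff first rest)
      _ = common_element_priorities_alt (first :: rest) :=
          ((foldl_enumerate_eq _ pvAlpha 0 0 enumerate_pvAlpha_weights).trans (zero_add _)).symm
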